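-- pv_equiv track=rewrite | github.com/hits-sdo/hits-sdo-similaritysearch | search_simclr/simclr_utils/vis_utils.py | concentric_order_of_subplots
-- ===== SOURCE A (Python) =====
-- def concentric_order_of_subplots(num_rows, num_cols):
--     # Calculate the center of the grid
--     center = (num_rows//2, num_cols//2)
--
--     # Initialize the concentric order list with the center of the grid
--     concentric_order = [center]
--
--     # Generate the concentric squares
--     for layer in range(1, max(num_rows, num_cols)//2 + 1):
--         # Top side
--         for col in range(center[1] - layer + 1, center[1] + layer + 1):
--             if 0 <= center[0] - layer < num_rows and 0 <= col < num_cols: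
--                 concentric_order.append((center[0] - layer, col))
--
--         # Right side
--         for row in range(center[0] - layer + 1, center[0] + layer + 1):
--             if 0 <= row < num_rows and 0 <= center[1] + layer < num_cols:
--                 concentric_order.append((row, center[1] + layer))
--
--         # Bottom side
--         for col in range(center[1] + layer - 1, center[1] - layer - 1, -1):
--             if 0 <= center[0] + layer < num_rows and 0 <= col < num_cols:
--                 concentric_order.append((center[0] + layer, col))
--
--         # Left side
--         for row in range(center[0] + layer - 1, center[0] - layer - 1, -1):
--             if 0 <= row < num_rows and 0 <= center[1] - layer < num_cols:
--                 concentric_order.append((row, center[1] - layer))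
--
--     return concentric_order
-- ===== SOURCE B (Python) =====
-- def concentric_order_of_subplots(num_rows, num_cols):
--     # Decorate-and-sort: assign every grid cell its closed-form "spiral index"
--     # (cells-before-its-ring + position along the ring's perimeter) and sort once.
--     cr, cc = num_rows // 2, num_cols // 2
--
--     def spiral_index(cell):
--         r, c = cell
--         dr, dc = r - cr, c - cc
--         layer = max(abs(dr), abs(dc))
--         if dr == -layer and dc > -layer:
--             pos = dc + layer            # top side: 1 .. 2*layer
--         elif dc == layer:
--             pos = 3 * layer + dr        # right side: 2*layer+1 .. 4*layer
--         elif dr == layer: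
--             pos = 5 * layer - dc        # bottom side: 4*layer+1 .. 6*layer
--         else:
--             pos = 7 * layer - dr        # left side: 6*layer+1 .. 8*layer
--         return (2 * layer - 1) ** 2 + pos
--
--     others = [(r, c) for r in range(num_rows) for c in range(num_cols)
--               if (r, c) != (cr, cc)]
--     others.sort(key=spiral_index)
--     return [(cr, cc)] + others
-- ===== Notes on version B (the rewrite author's own statement) =====
-- stated objective: alternative
-- what changed: B replaces A's generative layer-by-layer ring enumeration with a decorate-and-sort scheme: each grid cell gets a closed-form integer spiral index ((2L-1)^2 plus its perimeter position) and the cells are sorted once by that key.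
import Mathlib
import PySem

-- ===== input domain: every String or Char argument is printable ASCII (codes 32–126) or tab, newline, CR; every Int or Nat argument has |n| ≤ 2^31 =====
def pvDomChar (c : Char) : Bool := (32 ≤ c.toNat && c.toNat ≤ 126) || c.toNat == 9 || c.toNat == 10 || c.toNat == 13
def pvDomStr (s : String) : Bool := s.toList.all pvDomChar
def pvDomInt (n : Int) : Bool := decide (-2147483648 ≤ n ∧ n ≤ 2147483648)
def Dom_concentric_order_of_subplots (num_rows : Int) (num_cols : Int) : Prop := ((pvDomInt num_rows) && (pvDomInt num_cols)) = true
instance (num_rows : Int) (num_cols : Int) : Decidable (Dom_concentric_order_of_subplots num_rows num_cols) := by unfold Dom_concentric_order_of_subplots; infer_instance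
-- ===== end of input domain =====

-- B replaces A's generative layer-by-layer ring loops by decorate-and-sort: every grid
-- cell gets a closed-form integer spiral index and the cells are sorted once by it.

-- ===== PORT A =====
-- body of A's 'for layer in …' loop: four per-side loops, each testing bounds per cell
def aLayer (num_rows : Int) (num_cols : Int) (c1 : Int) (c2 : Int)
    (acc : List (Int × Int)) (layer : Int) : List (Int × Int) :=
  -- Top side
  let acc := (PySem.List.pyRange (c2 - layer + 1) (c2 + layer + 1) 1).foldl
    (fun acc col => if (0 ≤ c1 - layer ∧ c1 - layer < num_rows) ∧ (0 ≤ col ∧ col < num_cols)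
      then acc ++ [(c1 - layer, col)] else acc) acc
  -- Right side
  let acc := (PySem.List.pyRange (c1 - layer + 1) (c1 + layer + 1) 1).foldl
    (fun acc row => if (0 ≤ row ∧ row < num_rows) ∧ (0 ≤ c2 + layer ∧ c2 + layer < num_cols)
      then acc ++ [(row, c2 + layer)] else acc) acc
  -- Bottom side
  let acc := (PySem.List.pyRange (c2 + layer - 1) (c2 - layer - 1) (-1)).foldl
    (fun acc col => if (0 ≤ c1 + layer ∧ c1 + layer < num_rows) ∧ (0 ≤ col ∧ col < num_cols)
      then acc ++ [(c1 + layer, col)] else acc) acc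
  -- Left side
  (PySem.List.pyRange (c1 + layer - 1) (c1 - layer - 1) (-1)).foldl
    (fun acc row => if (0 ≤ row ∧ row < num_rows) ∧ (0 ≤ c2 - layer ∧ c2 - layer < num_cols)
      then acc ++ [(row, c2 - layer)] else acc) acc

def concentric_order_of_subplots (num_rows : Int) (num_cols : Int) : List (Int × Int) :=
  let c1 := PySem.Int.floordiv num_rows 2
  let c2 := PySem.Int.floordiv num_cols 2
  (PySem.List.pyRange 1 (PySem.Int.floordiv (max num_rows num_cols) 2 + 1) 1).foldl
    (aLayer num_rows num_cols c1 c2) [(c1, c2)]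

-- ===== PORT B =====
-- Source B's spiral_index: closed-form rank of a cell in the concentric order
def spiralIndex (cr : Int) (cc : Int) (cell : Int × Int) : Int :=
  let dr := cell.1 - cr
  let dc := cell.2 - cc
  let layer := max |dr| |dc|
  let pos :=
    if dr = -layer ∧ dc > -layer then dc + layer            -- top side: 1 .. 2*layer
    else if dc = layer then 3 * layer + dr                  -- right side: 2*layer+1 .. 4*layer
    else if dr = layer then 5 * layer - dc                  -- bottom side: 4*layer+1 .. 6*layer
    else 7 * layer - dr                                     -- left side: 6*layer+1 .. 8*layer
  (2 * layer - 1) ^ 2 + pos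

def concentric_order_of_subplots_alt (num_rows : Int) (num_cols : Int) : List (Int × Int) :=
  let cr := PySem.Int.floordiv num_rows 2
  let cc := PySem.Int.floordiv num_cols 2
  -- others = [(r, c) for r in range(num_rows) for c in range(num_cols) if (r, c) != (cr, cc)]
  let others := (PySem.List.pyRange 0 num_rows 1).flatMap (fun r =>
    ((PySem.List.pyRange 0 num_cols 1).map (fun c => (r, c))).filter
      (fun p => decide (p ≠ (cr, cc))))
  -- others.sort(key=spiral_index); return [(cr, cc)] + others
  (cr, cc) :: PySem.List.sorted others (spiralIndex cr cc) false

-- ===== PRECONDITION & SPEC =====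
def Spec_concentric_order_of_subplots (num_rows : Int) (num_cols : Int) (out : List (Int × Int)) : Prop := out = concentric_order_of_subplots_alt num_rows num_cols
instance (num_rows : Int) (num_cols : Int) (out : List (Int × Int)) : Decidable (Spec_concentric_order_of_subplots num_rows num_cols out) := by unfold Spec_concentric_order_of_subplots; infer_instance

-- ===== CLAIM (what is proved, stated in full; the proofs are below) =====
def Claim_equal_concentric_order_of_subplots : Prop := ∀ (num_rows : Int) (num_cols : Int), Dom_concentric_order_of_subplots num_rows num_cols → Spec_concentric_order_of_subplots num_rows num_cols (concentric_order_of_subplots num_rows num_cols)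

-- ===== LEMMAS AND PROOFS =====

-- the four sides of the full (unclipped) ring of a given layer, in A's traversal order
def ringL (c1 c2 layer : Int) : List (Int × Int) :=
  (PySem.List.pyRange (c2 - layer + 1) (c2 + layer + 1) 1).map (fun c => (c1 - layer, c)) ++
  (PySem.List.pyRange (c1 - layer + 1) (c1 + layer + 1) 1).map (fun r => (r, c2 + layer)) ++
  (PySem.List.pyRange (c2 + layer - 1) (c2 - layer - 1) (-1)).map (fun c => (c1 + layer, c)) ++
  (PySem.List.pyRange (c1 + layer - 1) (c1 - layer - 1) (-1)).map (fun r => (r, c2 - layer))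

def inGridB (R C : Int) (p : Int × Int) : Bool :=
  decide (0 ≤ p.1 ∧ p.1 < R ∧ 0 ≤ p.2 ∧ p.2 < C)

-- floor division by two, characterised
lemma fd2 (n : Int) : 2 * PySem.Int.floordiv n 2 ≤ n ∧ n < 2 * PySem.Int.floordiv n 2 + 2 := by
  unfold PySem.Int.floordiv
  rw [Int.fdiv_eq_ediv_of_nonneg _ (by norm_num)]
  omega

-- affine images of ranges
lemma map_add_pyRange (a b k : Int) :
    (PySem.List.pyRange a b 1).map (fun x => x + k) = PySem.List.pyRange (a + k) (b + k) 1 := by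
  rw [PySem.List.pyRange_one a b, PySem.List.pyRange_one (a + k) (b + k), List.map_map]
  have h : b + k - (a + k) = b - a := by ring
  rw [h]
  exact List.map_congr_left (fun x _ => by simp [Function.comp]; ring)

lemma map_sub_pyRange (a b k : Int) :
    (PySem.List.pyRange a b (-1)).map (fun x => k - x) = PySem.List.pyRange (k - a) (k - b) 1 := by
  rw [PySem.List.pyRange_neg_one a b, PySem.List.pyRange_one (k - a) (k - b), List.map_map]
  have h : k - b - (k - a) = a - b := by ring
  rw [h]
  exact List.map_congr_left (fun x _ => by simp [Function.comp]; ring)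

-- a flatMap of consecutive ranges is one range
lemma flatMap_ranges (g : Int → List Int) (s : Int → Int) (k : Nat) :
    ∀ a b : Int, (b - a).toNat = k → a ≤ b →
    (∀ x, a ≤ x → x < b → g x = PySem.List.pyRange (s x) (s (x + 1)) 1 ∧ s x ≤ s (x + 1)) →
    (PySem.List.pyRange a b 1).flatMap g = PySem.List.pyRange (s a) (s b) 1 ∧ s a ≤ s b := by
  induction k with
  | zero =>
    intro a b hk hab _
    have hba : b = a := by omega
    subst hba
    rw [PySem.List.pyRange_one_eq_nil le_rfl, PySem.List.pyRange_one_eq_nil le_rfl]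
    exact ⟨rfl, le_rfl⟩
  | succ k ih =>
    intro a b hk hab hg
    have hlt : a < b := by omega
    obtain ⟨h1, h2⟩ := hg a le_rfl hlt
    obtain ⟨ih1, ih2⟩ := ih (a + 1) b (by omega) (by omega)
      (fun x hx1 hx2 => hg x (by omega) hx2)
    refine ⟨?_, by omega⟩
    rw [PySem.List.pyRange_one_cons hlt, List.flatMap_cons, h1, ih1,
      ← PySem.List.pyRange_one_append (s a) (s (a + 1)) (s b) h2 ih2]

-- the spiral index along each side of a full ring (layer ≥ 1)
lemma key_top (cr cc L : Int) (hL : 1 ≤ L) (c : Int) (h1 : cc - L + 1 ≤ c) (h2 : c < cc + L + 1) :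
    spiralIndex cr cc (cr - L, c) = c + ((2 * L - 1) ^ 2 + L - cc) := by
  have hmax : max |cr - L - cr| |c - cc| = L := by
    simp only [Int.abs_eq_natAbs]; omega
  simp only [spiralIndex, hmax]
  rw [if_pos ⟨by ring, by omega⟩]
  ring

lemma key_right (cr cc L : Int) (hL : 1 ≤ L) (r : Int) (h1 : cr - L + 1 ≤ r) (h2 : r < cr + L + 1) :
    spiralIndex cr cc (r, cc + L) = r + ((2 * L - 1) ^ 2 + 3 * L - cr) := by
  have hmax : max |r - cr| |cc + L - cc| = L := by
    simp only [Int.abs_eq_natAbs]; omega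
  simp only [spiralIndex, hmax]
  rw [if_neg (by omega), if_pos (by omega)]
  ring

lemma key_bottom (cr cc L : Int) (hL : 1 ≤ L) (c : Int) (h1 : cc - L - 1 < c) (h2 : c ≤ cc + L - 1) :
    spiralIndex cr cc (cr + L, c) = ((2 * L - 1) ^ 2 + 5 * L + cc) - c := by
  have hmax : max |cr + L - cr| |c - cc| = L := by
    simp only [Int.abs_eq_natAbs]; omega
  simp only [spiralIndex, hmax]
  rw [if_neg (by omega), if_neg (by omega), if_pos (by omega)]
  ring

lemma key_left (cr cc L : Int) (hL : 1 ≤ L) (r : Int) (h1 : cr - L - 1 < r) (h2 : r ≤ cr + L - 1) :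
    spiralIndex cr cc (r, cc - L) = ((2 * L - 1) ^ 2 + 7 * L + cr) - r := by
  have hmax : max |r - cr| |cc - L - cc| = L := by
    simp only [Int.abs_eq_natAbs]; omega
  simp only [spiralIndex, hmax]
  rw [if_neg (by omega), if_neg (by omega), if_neg (by omega)]
  ring

-- the spiral indices along a full ring are exactly one ascending range
lemma ring_map_key (cr cc L : Int) (hL : 1 ≤ L) :
    (ringL cr cc L).map (spiralIndex cr cc) =
      PySem.List.pyRange ((2 * L - 1) ^ 2 + 1) ((2 * (L + 1) - 1) ^ 2 + 1) 1 := by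
  have t1 : (PySem.List.pyRange (cc - L + 1) (cc + L + 1) 1).map
      (fun c => spiralIndex cr cc (cr - L, c)) =
      PySem.List.pyRange ((2 * L - 1) ^ 2 + 1) ((2 * L - 1) ^ 2 + 2 * L + 1) 1 := by
    rw [List.map_congr_left (g := fun c => c + ((2 * L - 1) ^ 2 + L - cc))
      (fun x hx => key_top cr cc L hL x ((PySem.List.mem_pyRange_one).mp hx).1
        ((PySem.List.mem_pyRange_one).mp hx).2), map_add_pyRange]
    congr 1 <;> ring
  have t2 : (PySem.List.pyRange (cr - L + 1) (cr + L + 1) 1).map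
      (fun r => spiralIndex cr cc (r, cc + L)) =
      PySem.List.pyRange ((2 * L - 1) ^ 2 + 2 * L + 1) ((2 * L - 1) ^ 2 + 4 * L + 1) 1 := by
    rw [List.map_congr_left (g := fun r => r + ((2 * L - 1) ^ 2 + 3 * L - cr))
      (fun x hx => key_right cr cc L hL x ((PySem.List.mem_pyRange_one).mp hx).1
        ((PySem.List.mem_pyRange_one).mp hx).2), map_add_pyRange]
    congr 1 <;> ring
  have t3 : (PySem.List.pyRange (cc + L - 1) (cc - L - 1) (-1)).map
      (fun c => spiralIndex cr cc (cr + L, c)) =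
      PySem.List.pyRange ((2 * L - 1) ^ 2 + 4 * L + 1) ((2 * L - 1) ^ 2 + 6 * L + 1) 1 := by
    rw [List.map_congr_left (g := fun c => ((2 * L - 1) ^ 2 + 5 * L + cc) - c)
      (fun x hx => key_bottom cr cc L hL x ((PySem.List.mem_pyRange_neg_one).mp hx).1
        ((PySem.List.mem_pyRange_neg_one).mp hx).2), map_sub_pyRange]
    congr 1 <;> ring
  have t4 : (PySem.List.pyRange (cr + L - 1) (cr - L - 1) (-1)).map
      (fun r => spiralIndex cr cc (r, cc - L)) =
      PySem.List.pyRange ((2 * L - 1) ^ 2 + 6 * L + 1) ((2 * L - 1) ^ 2 + 8 * L + 1) 1 := by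
    rw [List.map_congr_left (g := fun r => ((2 * L - 1) ^ 2 + 7 * L + cr) - r)
      (fun x hx => key_left cr cc L hL x ((PySem.List.mem_pyRange_neg_one).mp hx).1
        ((PySem.List.mem_pyRange_neg_one).mp hx).2), map_sub_pyRange]
    congr 1 <;> ring
  have hend : (2 * (L + 1) - 1) ^ 2 + 1 = (2 * L - 1) ^ 2 + 8 * L + 1 := by ring
  unfold ringL
  rw [List.map_append, List.map_append, List.map_append,
    List.map_map, List.map_map, List.map_map, List.map_map]
  simp only [Function.comp_def]
  rw [t1, t2, t3, t4, hend, List.append_assoc, List.append_assoc,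
    ← PySem.List.pyRange_one_append ((2 * L - 1) ^ 2 + 4 * L + 1) ((2 * L - 1) ^ 2 + 6 * L + 1)
      ((2 * L - 1) ^ 2 + 8 * L + 1) (by omega) (by omega),
    ← PySem.List.pyRange_one_append ((2 * L - 1) ^ 2 + 2 * L + 1) ((2 * L - 1) ^ 2 + 4 * L + 1)
      ((2 * L - 1) ^ 2 + 8 * L + 1) (by omega) (by omega),
    ← PySem.List.pyRange_one_append ((2 * L - 1) ^ 2 + 1) ((2 * L - 1) ^ 2 + 2 * L + 1)
      ((2 * L - 1) ^ 2 + 8 * L + 1) (by omega) (by omega)]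

-- full-ring membership is "Chebyshev distance from the centre = layer"
lemma mem_ringL (cr cc L : Int) (hL : 1 ≤ L) (p : Int × Int) :
    p ∈ ringL cr cc L ↔ max |p.1 - cr| |p.2 - cc| = L := by
  rcases p with ⟨r, c⟩
  unfold ringL
  simp only [List.mem_append, List.mem_map, PySem.List.mem_pyRange_one,
    PySem.List.mem_pyRange_neg_one, Prod.mk.injEq]
  simp only [Int.abs_eq_natAbs]
  constructor
  · rintro (((⟨x, hx, h1, h2⟩ | ⟨x, hx, h1, h2⟩) | ⟨x, hx, h1, h2⟩) | ⟨x, hx, h1, h2⟩) <;> omega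
  · intro h
    by_cases hc1 : r - cr = -L ∧ c - cc ≠ -L
    · exact Or.inl (Or.inl (Or.inl ⟨c, by omega, by omega, rfl⟩))
    · by_cases hc2 : c - cc = L
      · exact Or.inl (Or.inl (Or.inr ⟨r, by omega, rfl, by omega⟩))
      · by_cases hc3 : r - cr = L
        · exact Or.inl (Or.inr ⟨c, by omega, by omega, rfl⟩)
        · exact Or.inr ⟨r, by omega, rfl, by omega⟩

-- one side loop of A: append the in-grid cells of that side
lemma side_fold (R C : Int) (P : Int → Prop) [DecidablePred P] (f : Int → Int × Int)
    (l : List Int) (acc : List (Int × Int))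
    (h : ∀ x ∈ l, decide (P x) = inGridB R C (f x)) :
    l.foldl (fun acc x => if P x then acc ++ [f x] else acc) acc
      = acc ++ (l.map f).filter (inGridB R C) := by
  rw [PySem.List.foldl_append_ite P f, List.filter_map, List.filter_congr h]
  simp only [Function.comp_def]

-- A's layer body appends the in-grid cells of the full ring
lemma aLayer_eq (R C c1 c2 : Int) (acc : List (Int × Int)) (L : Int) :
    aLayer R C c1 c2 acc L = acc ++ (ringL c1 c2 L).filter (inGridB R C) := by
  simp only [aLayer]
  have hiff : ∀ (a b : Int) (x : Int),
      decide ((0 ≤ a ∧ a < R) ∧ (0 ≤ x ∧ x < C)) = inGridB R C (a, x) ∧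
      decide ((0 ≤ x ∧ x < R) ∧ (0 ≤ b ∧ b < C)) = inGridB R C (x, b) := by
    intro a b x
    constructor <;>
      · apply decide_eq_decide.mpr
        constructor
        · rintro ⟨⟨h1, h2⟩, h3, h4⟩; exact ⟨h1, h2, h3, h4⟩
        · rintro ⟨h1, h2, h3, h4⟩; exact ⟨⟨h1, h2⟩, h3, h4⟩
  rw [side_fold R C _ _ _ _ (fun x _ => (hiff (c1 - L) 0 x).1),
      side_fold R C _ _ _ _ (fun x _ => (hiff 0 (c2 + L) x).2),
      side_fold R C _ _ _ _ (fun x _ => (hiff (c1 + L) 0 x).1),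
      side_fold R C _ _ _ _ (fun x _ => (hiff 0 (c2 - L) x).2)]
  unfold ringL
  simp only [List.filter_append, List.append_assoc]

-- A, characterised
lemma A_eq (R C : Int) :
    concentric_order_of_subplots R C =
      (PySem.Int.floordiv R 2, PySem.Int.floordiv C 2) ::
      (PySem.List.pyRange 1 (PySem.Int.floordiv (max R C) 2 + 1) 1).flatMap
        (fun L => (ringL (PySem.Int.floordiv R 2) (PySem.Int.floordiv C 2) L).filter (inGridB R C)) := by
  unfold concentric_order_of_subplots
  rw [PySem.List.foldl_congr_mem _ _ _ _ (fun acc x _ => aLayer_eq R C _ _ acc x),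
    PySem.List.foldl_append_eq_flatMap]
  rfl

lemma map_flatMap' (l : List Int) (g : Int → List (Int × Int)) (f : (Int × Int) → Int) :
    (l.flatMap g).map f = l.flatMap (fun x => (g x).map f) := by
  induction l with
  | nil => rfl
  | cons a t ih => simp [ih]

lemma flatMap_sublist (l : List Int) (g g' : Int → List (Int × Int))
    (h : ∀ x, (g' x).Sublist (g x)) : (l.flatMap g').Sublist (l.flatMap g) := by
  induction l with
  | nil => simp
  | cons a t ih => simpa using (h a).append ih

lemma flatMap_filter (l : List Int) (g : Int → List (Int × Int)) (p : Int × Int → Bool) :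
    l.flatMap (fun x => (g x).filter p) = (l.flatMap g).filter p := by
  induction l with
  | nil => rfl
  | cons a t ih => simp [List.filter_append, ih]

-- the spiral indices over the concatenated full rings 1..M form one ascending range
lemma U_map_key (cr cc M : Int) (hM : 0 ≤ M) :
    ((PySem.List.pyRange 1 (M + 1) 1).flatMap (ringL cr cc)).map (spiralIndex cr cc) =
      PySem.List.pyRange 2 ((2 * (M + 1) - 1) ^ 2 + 1) 1 := by
  rw [map_flatMap']
  have h := (flatMap_ranges (fun L => (ringL cr cc L).map (spiralIndex cr cc))
    (fun L => (2 * L - 1) ^ 2 + 1) (M + 1 - 1).toNat 1 (M + 1) (by omega) (by omega)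
    (fun x hx1 hx2 => ⟨ring_map_key cr cc x hx1, by
      show (2 * x - 1) ^ 2 + 1 ≤ (2 * (x + 1) - 1) ^ 2 + 1
      have h8 : (2 * (x + 1) - 1) ^ 2 = (2 * x - 1) ^ 2 + 8 * x := by ring
      omega⟩)).1
  rw [h]
  norm_num

lemma RS_pairwise (cr cc M R C : Int) (hM : 0 ≤ M) :
    ((PySem.List.pyRange 1 (M + 1) 1).flatMap
        (fun L => (ringL cr cc L).filter (inGridB R C))).Pairwise
      (fun p q => spiralIndex cr cc p < spiralIndex cr cc q) := by
  have hU : ((PySem.List.pyRange 1 (M + 1) 1).flatMap (ringL cr cc)).Pairwise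
      (fun p q => spiralIndex cr cc p < spiralIndex cr cc q) := by
    apply List.pairwise_map.mp
    rw [U_map_key cr cc M hM]
    exact PySem.List.pairwise_lt_pyRange_one _ _
  exact List.Pairwise.sublist
    (flatMap_sublist _ _ _ (fun L => List.filter_sublist)) hU

lemma RS_nodup (cr cc M R C : Int) (hM : 0 ≤ M) :
    ((PySem.List.pyRange 1 (M + 1) 1).flatMap
        (fun L => (ringL cr cc L).filter (inGridB R C))).Nodup := by
  have hU : ((PySem.List.pyRange 1 (M + 1) 1).flatMap (ringL cr cc)).Nodup := by
    apply List.Nodup.of_map (spiralIndex cr cc)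
    rw [U_map_key cr cc M hM]
    exact PySem.List.nodup_pyRange_one _ _
  exact List.Nodup.sublist
    (flatMap_sublist _ _ _ (fun L => List.filter_sublist)) hU

-- row-major enumeration of the grid
lemma RM_map_key2 (R C : Int) (hR : 0 ≤ R) (hC : 0 ≤ C) :
    ((PySem.List.pyRange 0 R 1).flatMap
        (fun r => (PySem.List.pyRange 0 C 1).map (fun c => (r, c)))).map
      (fun p => p.1 * C + p.2) = PySem.List.pyRange 0 (R * C) 1 := by
  rw [map_flatMap']
  have h := (flatMap_ranges
    (fun r => ((PySem.List.pyRange 0 C 1).map (fun c => (r, c))).map (fun p => p.1 * C + p.2))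
    (fun r => r * C) R.toNat 0 R (by omega) hR (fun x hx1 hx2 => by
      constructor
      · show ((PySem.List.pyRange 0 C 1).map (fun c => (x, c))).map (fun p => p.1 * C + p.2) =
          PySem.List.pyRange (x * C) ((x + 1) * C) 1
        rw [List.map_map]
        rw [List.map_congr_left (g := fun c => c + x * C) (fun y hy => by
          simp only [Function.comp_apply]; ring), map_add_pyRange]
        congr 1 <;> ring
      · show x * C ≤ (x + 1) * C
        have hxc : (x + 1) * C = x * C + C := by ring
        omega)).1
  rw [h]
  norm_num

lemma RM_nodup (R C : Int) (hR : 0 ≤ R) (hC : 0 ≤ C) :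
    ((PySem.List.pyRange 0 R 1).flatMap
        (fun r => (PySem.List.pyRange 0 C 1).map (fun c => (r, c)))).Nodup := by
  apply List.Nodup.of_map (fun p => p.1 * C + p.2)
  rw [RM_map_key2 R C hR hC]
  exact PySem.List.nodup_pyRange_one _ _

lemma mem_RM (R C : Int) (r c : Int) :
    (r, c) ∈ (PySem.List.pyRange 0 R 1).flatMap
        (fun r => (PySem.List.pyRange 0 C 1).map (fun c => (r, c))) ↔
      0 ≤ r ∧ r < R ∧ 0 ≤ c ∧ c < C := by
  rw [List.mem_flatMap]
  constructor
  · rintro ⟨a, ha, hm⟩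
    rw [List.mem_map] at hm
    obtain ⟨b, hb, heq⟩ := hm
    rw [PySem.List.mem_pyRange_one] at ha hb
    cases heq
    exact ⟨ha.1, ha.2, hb.1, hb.2⟩
  · rintro ⟨h1, h2, h3, h4⟩
    exact ⟨r, by rw [PySem.List.mem_pyRange_one]; exact ⟨h1, h2⟩,
      List.mem_map.mpr ⟨c, by rw [PySem.List.mem_pyRange_one]; exact ⟨h3, h4⟩, rfl⟩⟩

lemma inGrid_iff (R C r c : Int) :
    inGridB R C (r, c) = true ↔ 0 ≤ r ∧ r < R ∧ 0 ≤ c ∧ c < C := by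
  simp [inGridB]

-- membership equivalence between A's clipped rings and B's filtered row-major grid
lemma mem_iff_main (R C : Int) (_hR : 1 ≤ R) (_hC : 1 ≤ C) (p : Int × Int) :
    p ∈ (PySem.List.pyRange 1 (PySem.Int.floordiv (max R C) 2 + 1) 1).flatMap
        (fun L => (ringL (PySem.Int.floordiv R 2) (PySem.Int.floordiv C 2) L).filter (inGridB R C)) ↔
    p ∈ ((PySem.List.pyRange 0 R 1).flatMap
        (fun r => (PySem.List.pyRange 0 C 1).map (fun c => (r, c)))).filter
      (fun q => decide (q ≠ (PySem.Int.floordiv R 2, PySem.Int.floordiv C 2))) := by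
  obtain ⟨hr1, hr2⟩ := fd2 R
  obtain ⟨hc1, hc2⟩ := fd2 C
  obtain ⟨hm1, hm2⟩ := fd2 (max R C)
  have hRm : R ≤ max R C := le_max_left R C
  have hCm : C ≤ max R C := le_max_right R C
  rcases p with ⟨r, c⟩
  rw [List.mem_flatMap, List.mem_filter]
  constructor
  · rintro ⟨L, hL, hm⟩
    rw [PySem.List.mem_pyRange_one] at hL
    rw [List.mem_filter, mem_ringL _ _ _ hL.1] at hm
    obtain ⟨hring, hgrid⟩ := hm
    rw [inGrid_iff] at hgrid
    refine ⟨(mem_RM R C r c).mpr hgrid, ?_⟩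
    rw [decide_eq_true_eq]
    intro heq
    rw [Prod.mk.injEq] at heq
    simp only [Int.abs_eq_natAbs] at hring
    omega
  · rintro ⟨hm, hne⟩
    rw [mem_RM] at hm
    rw [decide_eq_true_eq, Ne, Prod.mk.injEq, not_and_or] at hne
    have h1L : 1 ≤ max |r - PySem.Int.floordiv R 2| |c - PySem.Int.floordiv C 2| ∧
        max |r - PySem.Int.floordiv R 2| |c - PySem.Int.floordiv C 2| <
          PySem.Int.floordiv (max R C) 2 + 1 := by
      simp only [Int.abs_eq_natAbs]
      omega
    refine ⟨max |r - PySem.Int.floordiv R 2| |c - PySem.Int.floordiv C 2|,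
      PySem.List.mem_pyRange_one.mpr ⟨h1L.1, h1L.2⟩, ?_⟩
    rw [List.mem_filter, mem_ringL _ _ _ h1L.1, inGrid_iff]
    exact ⟨rfl, hm⟩

-- ===== VERDICT (by name: the statement is the Claim_ definition above) =====
theorem concentric_order_of_subplots_spec : Claim_equal_concentric_order_of_subplots := by
  intro R C _
  unfold Spec_concentric_order_of_subplots
  rw [A_eq]
  simp only [concentric_order_of_subplots_alt]
  congr 1
  rw [flatMap_filter (PySem.List.pyRange 0 R 1)
    (fun r => (PySem.List.pyRange 0 C 1).map (fun c => (r, c)))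
    (fun q => decide (q ≠ (PySem.Int.floordiv R 2, PySem.Int.floordiv C 2)))]
  by_cases hRC : 1 ≤ R ∧ 1 ≤ C
  · obtain ⟨hR, hC⟩ := hRC
    have hM : 0 ≤ PySem.Int.floordiv (max R C) 2 := by
      have := fd2 (max R C)
      have : 1 ≤ max R C := le_trans hR (le_max_left R C)
      omega
    refine (PySem.List.sorted_eq_of_perm_of_pairwise_lt _ _ _ ?_ ?_).symm
    · refine (List.perm_ext_iff_of_nodup (RS_nodup _ _ _ R C hM)
        ((RM_nodup R C (by omega) (by omega)).filter _)).mpr ?_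
      exact mem_iff_main R C hR hC
    · exact RS_pairwise _ _ _ R C hM
  · have hRS : (PySem.List.pyRange 1 (PySem.Int.floordiv (max R C) 2 + 1) 1).flatMap
        (fun L => (ringL (PySem.Int.floordiv R 2) (PySem.Int.floordiv C 2) L).filter (inGridB R C)) = [] := by
      apply List.flatMap_eq_nil_iff.mpr
      intro L _
      apply List.filter_eq_nil_iff.mpr
      intro p _
      rcases p with ⟨r, c⟩
      rw [Bool.not_eq_true, ← Bool.not_eq_true, inGrid_iff]
      omega
    have hRM : ((PySem.List.pyRange 0 R 1).flatMap
        (fun r => (PySem.List.pyRange 0 C 1).map (fun c => (r, c)))).filter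
        (fun q => decide (q ≠ (PySem.Int.floordiv R 2, PySem.Int.floordiv C 2))) = [] := by
      apply List.filter_eq_nil_iff.mpr
      intro p hp
      rcases p with ⟨r, c⟩
      rw [mem_RM] at hp
      omega
    rw [hRS, hRM]
    rfl
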